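-- pv_equiv track=rewrite | github.com/hilalmufti/arc-experiments | arc/arc_search/_mcts.py | seq_to_program
-- ===== SOURCE A (Python) =====
-- def seq_to_program(primitives):
--     program_strings = []
--     for primitive in primitives:
--         l = "".join([p + "(" for p in primitives])
--         r = ")" * len(primitives)
--         program_string = f"lambda I: {l}I{r}"
--         program_strings.append(program_string)
--     return program_strings
-- ===== SOURCE B (Python) =====
-- from functools import reduce
--
-- def seq_to_program(primitives):
--     nested = reduce(lambda acc, p: f"{p}({acc})", reversed(primitives), "I")
--     return [f"lambda I: {nested}"] * len(primitives)
-- ===== Notes on version B (the rewrite author's own statement) =====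
-- stated objective: simpler
-- what changed: Replaces the per-element loop that rebuilds the string (prefix join of 'p(' plus ')'*n) with a single fold over reversed(primitives) that nests the string directly, then replicates it len(primitives) times.
import Mathlib
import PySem

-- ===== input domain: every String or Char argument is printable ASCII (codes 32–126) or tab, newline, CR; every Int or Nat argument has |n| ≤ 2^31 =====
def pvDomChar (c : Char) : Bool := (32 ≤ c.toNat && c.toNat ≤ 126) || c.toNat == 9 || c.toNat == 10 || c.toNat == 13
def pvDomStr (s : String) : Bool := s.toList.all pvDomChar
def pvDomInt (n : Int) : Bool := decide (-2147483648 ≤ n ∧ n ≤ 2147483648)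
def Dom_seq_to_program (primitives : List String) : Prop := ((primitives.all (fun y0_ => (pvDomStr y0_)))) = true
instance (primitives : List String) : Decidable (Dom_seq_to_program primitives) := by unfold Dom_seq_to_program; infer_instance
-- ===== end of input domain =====

-- B builds the nested program string once by a reverse fold and replicates it, instead of A's per-element rebuild from a join and repeated ')'.
-- ===== PORT A =====
def seq_to_program (primitives : List String) : List String :=
  primitives.foldl (fun program_strings _primitive =>
    let l := String.join (primitives.map (fun p => p ++ "("))
    let r := String.join (List.replicate primitives.length ")")
    let program_string := "lambda I: " ++ l ++ "I" ++ r
    program_strings ++ [program_string]) []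

-- ===== PORT B =====
def seq_to_program_alt (primitives : List String) : List String :=
  let nested := primitives.reverse.foldl (fun acc p => p ++ "(" ++ acc ++ ")") "I"
  List.replicate primitives.length ("lambda I: " ++ nested)

-- ===== PRECONDITION & SPEC =====
def Spec_seq_to_program (primitives : List String) (out : List String) : Prop := out = seq_to_program_alt primitives
instance (primitives : List String) (out : List String) : Decidable (Spec_seq_to_program primitives out) := by unfold Spec_seq_to_program; infer_instance

-- ===== CLAIM (what is proved, stated in full; the proofs are below) =====
def Claim_equal_seq_to_program : Prop := ∀ (primitives : List String), Dom_seq_to_program primitives → Spec_seq_to_program primitives (seq_to_program primitives)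

-- ===== LEMMAS AND PROOFS =====

-- String.join helpers
theorem str_foldl_shift (xs : List String) : ∀ a : String,
    List.foldl (fun r s => r ++ s) a xs = a ++ List.foldl (fun r s => r ++ s) "" xs := by
  induction xs with
  | nil => simp
  | cons x xs ih =>
      intro a
      simp only [List.foldl_cons]
      rw [ih (a ++ x), ih ("" ++ x)]
      simp [String.append_assoc]

theorem str_join_cons (x : String) (xs : List String) :
    String.join (x :: xs) = x ++ String.join xs := by
  simp only [String.join, List.foldl_cons]
  rw [str_foldl_shift]
  simp

-- a closing paren commutes past a block of closing parens
theorem join_replicate_paren (n : Nat) :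
    String.join (List.replicate n ")") ++ ")" = ")" ++ String.join (List.replicate n ")") := by
  induction n with
  | zero => rfl
  | succ n ih =>
      rw [List.replicate_succ, str_join_cons, String.append_assoc, ih]

-- the nested fold equals A's join-plus-parens string
theorem nest_eq (ps : List String) :
    ps.reverse.foldl (fun acc p => p ++ "(" ++ acc ++ ")") "I"
      = String.join (ps.map (fun p => p ++ "(")) ++ "I"
          ++ String.join (List.replicate ps.length ")") := by
  rw [List.foldl_reverse]
  induction ps with
  | nil => rfl
  | cons p ps ih =>
      simp only [List.foldr_cons, ih, List.map_cons, List.length_cons,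
        List.replicate_succ, str_join_cons, ← String.append_assoc]
      rw [String.append_assoc, join_replicate_paren]
      simp [← String.append_assoc]

-- A's foldl appends the same string once per element
theorem foldl_append_const {α : Type} (xs : List α) (c : String) (acc : List String) :
    xs.foldl (fun l (_ : α) => l ++ [c]) acc = acc ++ List.replicate xs.length c := by
  induction xs generalizing acc with
  | nil => simp
  | cons x xs ih =>
      rw [List.foldl_cons, ih]
      simp [List.replicate_succ]

-- ===== VERDICT (by name: the statement is the Claim_ definition above) =====
theorem seq_to_program_spec : Claim_equal_seq_to_program := by
  intro primitives _
  unfold Spec_seq_to_program seq_to_program seq_to_program_alt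
  rw [foldl_append_const, nest_eq]
  simp only [List.nil_append]
  congr 1
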